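-- pv_equiv track=rewrite | github.com/adzcai/neurorl | envs/language/utils.py | go_activate
-- ===== SOURCE A (Python) =====
-- def go_activate(curid, newid, action_goto_next=[31], action_goto_prev=[32]):
-- 	'''
-- 	return a list of action idxs to activate item newid, starting from previous activated item curid
-- 	'''
-- 	actions = []
-- 	diff = curid - newid
-- 	while diff != 0:
-- 		if diff > 0:
-- 			actions += action_goto_prev
-- 			curid -= 1
-- 		else:
-- 			actions += action_goto_next
-- 			curid += 1
-- 		diff = curid - newid
-- 	return actions
-- ===== SOURCE B (Python) =====
-- def go_activate(curid, newid, action_goto_next=[31], action_goto_prev=[32]):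
--     diff = curid - newid
--     if diff > 0:
--         return action_goto_prev * diff
--     elif diff < 0:
--         return action_goto_next * (-diff)
--     return []
-- ===== Notes on version B (the rewrite author's own statement) =====
-- stated objective: simpler
-- what changed: Replaces the step-by-step while loop with a closed-form construction: repeat the prev/next action list |curid-newid| times via list multiplication.
import Mathlib
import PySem

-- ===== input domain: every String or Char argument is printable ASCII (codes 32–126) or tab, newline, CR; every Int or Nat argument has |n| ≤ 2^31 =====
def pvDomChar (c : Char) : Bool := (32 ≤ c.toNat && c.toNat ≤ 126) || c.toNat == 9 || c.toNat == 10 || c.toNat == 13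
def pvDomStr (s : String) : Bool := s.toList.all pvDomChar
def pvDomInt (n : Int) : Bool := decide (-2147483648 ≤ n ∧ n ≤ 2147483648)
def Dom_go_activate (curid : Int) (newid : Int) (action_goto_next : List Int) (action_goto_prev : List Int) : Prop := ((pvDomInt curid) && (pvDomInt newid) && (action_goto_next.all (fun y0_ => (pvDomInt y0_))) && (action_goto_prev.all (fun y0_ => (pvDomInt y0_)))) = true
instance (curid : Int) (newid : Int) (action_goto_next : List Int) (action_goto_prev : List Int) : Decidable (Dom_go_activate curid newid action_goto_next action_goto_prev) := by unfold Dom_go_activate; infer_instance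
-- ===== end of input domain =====

-- B replaces A's step-by-step while loop with a closed-form repetition of the action list (simpler).


-- ===== PORT A =====
-- the while loop of A: state = (curid, actions); terminates because |curid - newid| decreases
def goLoop (curid : Int) (newid : Int) (action_goto_next : List Int) (action_goto_prev : List Int) (actions : List Int) : List Int :=
  if curid - newid = 0 then actions
  else if curid - newid > 0 then
    goLoop (curid - 1) newid action_goto_next action_goto_prev (actions ++ action_goto_prev)
  else
    goLoop (curid + 1) newid action_goto_next action_goto_prev (actions ++ action_goto_next)
termination_by (curid - newid).natAbs
decreasing_by all_goals omega

def go_activate (curid : Int) (newid : Int) (action_goto_next : List Int) (action_goto_prev : List Int) : List Int :=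
  goLoop curid newid action_goto_next action_goto_prev []

-- ===== PORT B =====
-- list * n in Python  =  flatten of n copies
def go_activate_alt (curid : Int) (newid : Int) (action_goto_next : List Int) (action_goto_prev : List Int) : List Int :=
  let diff := curid - newid
  if diff > 0 then (List.replicate diff.toNat action_goto_prev).flatten
  else if diff < 0 then (List.replicate (-diff).toNat action_goto_next).flatten
  else []

-- ===== PRECONDITION & SPEC =====
def Spec_go_activate (curid : Int) (newid : Int) (action_goto_next : List Int) (action_goto_prev : List Int) (out : List Int) : Prop := out = go_activate_alt curid newid action_goto_next action_goto_prev
instance (curid : Int) (newid : Int) (action_goto_next : List Int) (action_goto_prev : List Int) (out : List Int) : Decidable (Spec_go_activate curid newid action_goto_next action_goto_prev out) := by unfold Spec_go_activate; infer_instance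

-- ===== CLAIM (what is proved, stated in full; the proofs are below) =====
def Claim_equal_go_activate : Prop := ∀ (curid : Int) (newid : Int) (action_goto_next : List Int) (action_goto_prev : List Int), Dom_go_activate curid newid action_goto_next action_goto_prev → Spec_go_activate curid newid action_goto_next action_goto_prev (go_activate curid newid action_goto_next action_goto_prev)

-- ===== LEMMAS AND PROOFS =====
theorem goLoop_pos (newid : Int) (nx pv : List Int) :
    ∀ (k : Nat) (acc : List Int),
      goLoop (newid + k) newid nx pv acc = acc ++ (List.replicate k pv).flatten := by
  intro k
  induction k with
  | zero => intro acc; rw [goLoop]; simp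
  | succ n ih =>
    intro acc
    rw [goLoop]
    have h1 : ¬ (newid + (↑(n+1) : Int) - newid = 0) := by push_cast; omega
    have h2 : newid + (↑(n+1) : Int) - newid > 0 := by push_cast; omega
    simp only [h1, h2, if_pos]
    have : newid + (↑(n+1) : Int) - 1 = newid + n := by push_cast; omega
    rw [this, ih]
    simp [List.replicate_succ]

theorem goLoop_neg (newid : Int) (nx pv : List Int) :
    ∀ (k : Nat) (acc : List Int),
      goLoop (newid - k) newid nx pv acc = acc ++ (List.replicate k nx).flatten := by
  intro k
  induction k with
  | zero => intro acc; rw [goLoop]; simp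
  | succ n ih =>
    intro acc
    rw [goLoop]
    have h1 : ¬ (newid - (↑(n+1) : Int) - newid = 0) := by push_cast; omega
    have h2 : ¬ (newid - (↑(n+1) : Int) - newid > 0) := by push_cast; omega
    simp only [h1, h2]
    have : newid - (↑(n+1) : Int) + 1 = newid - n := by push_cast; omega
    rw [this, ih]
    simp [List.replicate_succ]

-- ===== VERDICT (by name: the statement is the Claim_ definition above) =====
theorem go_activate_spec : Claim_equal_go_activate := by
  intro curid newid nx pv _
  unfold Spec_go_activate go_activate go_activate_alt
  rcases lt_trichotomy curid newid with h | h | h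
  · have hk : curid = newid - (newid - curid).toNat := by omega
    rw [hk, goLoop_neg]
    have h1 : ¬ (newid - (↑(newid - curid).toNat : Int) - newid > 0) := by omega
    have h2 : newid - (↑(newid - curid).toNat : Int) - newid < 0 := by omega
    have h3 : (-(newid - (↑(newid - curid).toNat : Int) - newid)).toNat = (newid - curid).toNat := by omega
    simp only [h1, h2, h3, if_pos]
    simp
  · subst h
    rw [goLoop]
    simp
  · have hk : curid = newid + (curid - newid).toNat := by omega
    rw [hk, goLoop_pos]
    have h1 : newid + (↑(curid - newid).toNat : Int) - newid > 0 := by omega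
    have h3 : (newid + (↑(curid - newid).toNat : Int) - newid).toNat = (curid - newid).toNat := by omega
    simp only [h1, h3, if_pos]
    simp
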